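-- pv_equiv track=rewrite | github.com/tomasnyberg/cp_notebook | codeforces/867/D.py | construct_b
-- ===== SOURCE A (Python) =====
-- def construct_b(perm):
--     result = []
--     for i in range(len(perm)):
--         total = 0
--         for j in range(i+1):
--             total += perm[j]
--         result.append(total % len(perm) + 1)
--     return result
-- ===== SOURCE B (Python) =====
-- def construct_b(perm):
--     n = len(perm)
--     result = []
--     total = 0
--     for x in perm:
--         total += x
--         result.append(total % n + 1)
--     return result
-- ===== Notes on version B (the rewrite author's own statement) =====
-- stated objective: faster
-- what changed: replaces the quadratic recomputation of each prefix sum by a single pass carrying a running cumulative total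
import Mathlib
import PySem

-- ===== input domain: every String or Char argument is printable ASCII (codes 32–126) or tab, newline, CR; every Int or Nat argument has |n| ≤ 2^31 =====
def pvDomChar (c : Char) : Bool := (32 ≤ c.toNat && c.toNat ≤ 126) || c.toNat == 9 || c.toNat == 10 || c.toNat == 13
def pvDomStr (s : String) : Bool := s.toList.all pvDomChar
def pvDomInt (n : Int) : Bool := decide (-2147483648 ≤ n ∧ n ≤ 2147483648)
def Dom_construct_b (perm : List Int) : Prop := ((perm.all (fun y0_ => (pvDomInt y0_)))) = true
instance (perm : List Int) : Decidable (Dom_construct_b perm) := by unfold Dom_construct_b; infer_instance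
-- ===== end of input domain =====

-- B replaces A's quadratic recomputation of every prefix sum with a single pass
-- carrying a running cumulative total (objective: faster, asymptotic).

-- ===== PORT A =====
def construct_b (perm : List Int) : List Int :=
  (PySem.List.pyRange 0 (perm.length : Int) 1).foldl
    (fun result i =>
      result ++
        [PySem.Int.mod
            ((PySem.List.pyRange 0 (i + 1) 1).foldl
              (fun total j => total + PySem.List.pyGetD perm j 0) 0)
            (perm.length : Int) + 1])
    []

-- ===== PORT B =====
def construct_b_alt (perm : List Int) : List Int :=
  (perm.foldl
    (fun (st : List Int × Int) x =>
      let total := st.2 + x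
      (st.1 ++ [PySem.Int.mod total (perm.length : Int) + 1], total))
    ([], 0)).1

-- ===== PRECONDITION & SPEC =====
def Spec_construct_b (perm : List Int) (out : List Int) : Prop := out = construct_b_alt perm
instance (perm : List Int) (out : List Int) : Decidable (Spec_construct_b perm out) := by unfold Spec_construct_b; infer_instance

-- ===== CLAIM (what is proved, stated in full; the proofs are below) =====
def Claim_equal_construct_b : Prop := ∀ (perm : List Int), Dom_construct_b perm → Spec_construct_b perm (construct_b perm)

-- ===== LEMMAS AND PROOFS =====

-- the inner Python loop of A computes the sum of the first k elements
theorem inner_map_eq_take (perm : List Int) (k : Nat) (hk : k ≤ perm.length) :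
    (PySem.List.pyRange 0 (k : Int) 1).map (fun j => PySem.List.pyGetD perm j 0)
      = perm.take k := by
  induction k with
  | zero => simp [PySem.List.pyRange_one_eq_nil]
  | succ m ih =>
    have hm : m ≤ perm.length := Nat.le_of_succ_le hk
    have hsplit : PySem.List.pyRange 0 ((m + 1 : Nat) : Int) 1
        = PySem.List.pyRange 0 (m : Nat) 1 ++ [(m : Int)] := by
      have := PySem.List.pyRange_one_succ_right (a := 0) (b := (m : Int)) (by positivity)
      simpa [Nat.cast_add] using this
    rw [hsplit, List.map_append, ih hm]
    have hget : PySem.List.pyGetD perm (m : Int) 0 = perm[m]'(by omega) := by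
      have := PySem.List.pyGetD_eq_getElem (xs := perm) (i := (m : Int)) (d := 0)
        (by positivity) (by exact_mod_cast hk)
      simpa using this
    have h2 : perm.take (m + 1) = perm.take m ++ [perm[m]'(by omega)] := by
      rw [List.take_add_one, List.getElem?_eq_getElem (by omega : m < perm.length)]
      rfl
    simp only [List.map_cons, List.map_nil]
    rw [hget, h2]

theorem a_side (perm : List Int) :
    construct_b perm =
      (List.range perm.length).map
        (fun k => PySem.Int.mod ((perm.take (k + 1)).sum) (perm.length : Int) + 1) := by
  unfold construct_b
  rw [PySem.List.foldl_append_singleton_eq_map]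
  rw [PySem.List.pyRange_zero_nat]
  rw [List.map_map]
  refine List.map_congr_left ?_
  intro k hk
  have hk' : k < perm.length := List.mem_range.mp hk
  have h1 : ((k : Int) + 1) = ((k + 1 : Nat) : Int) := by push_cast; ring
  simp only [Function.comp]
  rw [PySem.List.foldl_add]
  rw [h1, inner_map_eq_take perm (k + 1) (by omega)]
  simp

theorem b_side (xs : List Int) (n : Int) (acc : List Int) (t : Int) :
    (xs.foldl
      (fun (st : List Int × Int) x =>
        (st.1 ++ [PySem.Int.mod (st.2 + x) n + 1], st.2 + x))
      (acc, t)).1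
    = acc ++ (List.range xs.length).map
        (fun k => PySem.Int.mod (t + (xs.take (k + 1)).sum) n + 1) := by
  induction xs generalizing acc t with
  | nil => simp
  | cons x xs ih =>
    simp only [List.foldl_cons, List.length_cons]
    rw [ih]
    rw [List.range_succ_eq_map, List.map_cons, List.map_map]
    simp [Function.comp, add_assoc, List.append_assoc]

-- ===== VERDICT (by name: the statement is the Claim_ definition above) =====
theorem construct_b_spec : Claim_equal_construct_b := by
  intro perm _
  unfold Spec_construct_b construct_b_alt
  rw [a_side]
  have := b_side perm (perm.length : Int) [] 0
  simp only [zero_add] at this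
  rw [this]
  simp
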